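-- pv_equiv track=rewrite | github.com/imshahinul/PrbSol | Leetcode/2360/solution.py | longestCycle
-- ===== SOURCE A (Python) =====
-- from typing import List
--
-- def longestCycle(edges: List[int]) -> int:
--     out,t = -1,1
--     no_of_traversal = [0] * len(edges)
--
--     for idx, edge in enumerate(edges):
--         if no_of_traversal[idx]:
--             continue
--         start = t
--         x = idx
--         while x != -1 and not no_of_traversal[x]:
--             no_of_traversal[x] = t
--             t += 1
--             x = edges[x]
--         if x != -1 and no_of_traversal[x] >= start:
--             out = max(out, t - no_of_traversal[x])
--
--     return out
-- ===== SOURCE B (Python) =====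
-- def longestCycle(edges):
--     # Per-node self-return probe: a node x lies on a cycle iff following edges
--     # from x returns to x within len(edges) steps; the step count is the cycle length.
--     n = len(edges)
--     best = -1
--     for x in range(n):
--         y = edges[x]
--         k = 1
--         while k < n and y != -1 and y != x:
--             y = edges[y]
--             k += 1
--         if y == x:
--             best = max(best, k)
--     return best
-- ===== Notes on version B (the rewrite author's own statement) =====
-- stated objective: alternative
-- what changed: A does one global timestamped traversal over a shared visited array, skipping marked nodes and reading each cycle length off as a timestamp difference; B keeps no shared state at all and instead probes every node independently, walking at most n steps and testing whether the walk returns to its start node, the step count at return being that cycle's length.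
-- outside the precondition, e.g. on longestCycle([-2, 0]): A returns 1, B returns -1
import Mathlib
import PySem

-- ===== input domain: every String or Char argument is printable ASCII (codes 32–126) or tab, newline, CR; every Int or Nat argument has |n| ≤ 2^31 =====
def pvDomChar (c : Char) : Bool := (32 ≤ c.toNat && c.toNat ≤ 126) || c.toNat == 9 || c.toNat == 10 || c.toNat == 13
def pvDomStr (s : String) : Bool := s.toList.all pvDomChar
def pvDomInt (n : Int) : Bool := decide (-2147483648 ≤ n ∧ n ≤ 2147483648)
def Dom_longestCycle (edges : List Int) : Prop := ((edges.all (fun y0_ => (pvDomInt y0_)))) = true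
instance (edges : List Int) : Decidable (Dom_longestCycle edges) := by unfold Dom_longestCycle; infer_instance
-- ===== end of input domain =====

-- B replaces A's global timestamped traversal (one shared visited array, cycle length read
-- off as a timestamp difference) by an independent per-node self-return probe: x lies on a
-- cycle iff following edges from x returns to x within n steps (alternative algorithm,
-- O(n^2) instead of O(n)).


-- ===== PORT A =====
-- A's inner while loop; state (ts, t, x); fuel `edges.length + 1` bounds the ≤ n body
-- executions (each iteration marks a previously unmarked node).  Out-of-range indexing
-- (impossible under Pre_) is totalised with pyGetD's default.
def lcWalkA (edges : List Int) : Nat → Int → List Int → Int → (List Int × Int × Int)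
  | 0, x, ts, t => (ts, t, x)
  | fuel+1, x, ts, t =>
    if x ≠ -1 ∧ PySem.List.pyGetD ts x 0 = 0 then
      lcWalkA edges fuel (PySem.List.pyGetD edges x (-1)) (PySem.List.pySetD ts x t) (t + 1)
    else (ts, t, x)

-- one iteration of A's outer `for idx, edge in enumerate(edges)` (`edge` itself is unused)
def lcStepA (edges : List Int) (st : List Int × Int × Int) (idx : Int) : List Int × Int × Int :=
  if PySem.List.pyGetD st.1 idx 0 ≠ 0 then st
  else
    let start := st.2.1
    let w := lcWalkA edges (edges.length + 1) idx st.1 st.2.1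
    (w.1, w.2.1,
      if w.2.2 ≠ -1 ∧ PySem.List.pyGetD w.1 w.2.2 0 ≥ start
      then max st.2.2 (w.2.1 - PySem.List.pyGetD w.1 w.2.2 0) else st.2.2)

def longestCycle (edges : List Int) : Int :=
  ((PySem.List.pyRange 0 edges.length 1).foldl (lcStepA edges)
    (List.replicate edges.length 0, 1, -1)).2.2

-- ===== PORT B =====
-- B's inner while loop: state (y, k); fuel `edges.length` bounds the ≤ n-1 executions
-- (k starts at 1 and the loop runs only while k < n).
def bWalk (edges : List Int) (x : Int) : Nat → Int → Int → (Int × Int)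
  | 0, y, k => (y, k)
  | fuel+1, y, k =>
    if k < (edges.length : Int) ∧ y ≠ -1 ∧ y ≠ x then
      bWalk edges x fuel (PySem.List.pyGetD edges y (-1)) (k + 1)
    else (y, k)

-- one iteration of B's outer `for x in range(n)`
def lcStepB (edges : List Int) (best : Int) (x : Int) : Int :=
  let w := bWalk edges x edges.length (PySem.List.pyGetD edges x (-1)) 1
  if w.1 = x then max best w.2 else best

def longestCycle_alt (edges : List Int) : Int :=
  (PySem.List.pyRange 0 edges.length 1).foldl (lcStepB edges) (-1)

-- ===== PRECONDITION & SPEC =====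
-- Pre_ restricts to the problem's natural domain (LeetCode 2360): every edge is -1 or a
-- valid node index.  Outside it Python list indexing raises IndexError (values ≥ n or
-- < -n) or silently wraps negative values — an artefact of A's indexing, not the task.
def Pre_longestCycle (edges : List Int) : Prop :=
  ∀ e ∈ edges, e = -1 ∨ (0 ≤ e ∧ e < (edges.length : Int))
instance (edges : List Int) : Decidable (Pre_longestCycle edges) := by unfold Pre_longestCycle; infer_instance

def pvWitness_longestCycle : List Int := [3, 3, 4, 2, 3]

def Spec_longestCycle (edges : List Int) (out : Int) : Prop := out = longestCycle_alt edges
instance (edges : List Int) (out : Int) : Decidable (Spec_longestCycle edges out) := by unfold Spec_longestCycle; infer_instance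

-- ===== CLAIM (what is proved, stated in full; the proofs are below) =====
def Claim_equal_longestCycle : Prop := ∀ (edges : List Int), Dom_longestCycle edges → Pre_longestCycle edges → Spec_longestCycle edges (longestCycle edges)

-- ===== LEMMAS AND PROOFS =====

-- The common semantic yardstick: the step function, its iterates, and the first return
-- time of a node (its cycle length, if any).
def fstep (edges : List Int) (x : Int) : Int :=
  if 0 ≤ x ∧ x < (edges.length : Int) then PySem.List.pyGetD edges x (-1) else -1

def iterF (edges : List Int) : Nat → Int → Int
  | 0, x => x
  | k+1, x => iterF edges k (fstep edges x)

def cyc (edges : List Int) (x : Int) : Option Nat :=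
  (List.range' 1 edges.length).find? (fun k => decide (iterF edges k x = x))

-- `out` is the maximum of -1 and all first-return times of nodes satisfying P
def IsBest (edges : List Int) (P : Int → Prop) (out : Int) : Prop :=
  (out = -1 ∨ ∃ x k, P x ∧ cyc edges x = some k ∧ out = (k : Int)) ∧
  (∀ x k, P x → cyc edges x = some k → (k : Int) ≤ out)

def Marked (edges ts : List Int) (y : Int) : Prop :=
  0 ≤ y ∧ y < (edges.length : Int) ∧ PySem.List.pyGetD ts y 0 ≠ 0

theorem IsBest_unique (edges : List Int) (P Q : Int → Prop) (a b : Int)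
    (hPQ : ∀ y, P y ↔ Q y) (ha : IsBest edges P a) (hb : IsBest edges Q b) : a = b := by
  obtain ⟨ha1, ha2⟩ := ha
  obtain ⟨hb1, hb2⟩ := hb
  rcases ha1 with h | ⟨x, k, hx, hc, he⟩
  · rcases hb1 with h' | ⟨x, k, hx, hc, he⟩
    · rw [h, h']
    · have := ha2 x k ((hPQ x).mpr hx) hc
      have : (0:Int) ≤ k := Int.natCast_nonneg k
      omega
  · have h1 := hb2 x k ((hPQ x).mp hx) hc
    rcases hb1 with h' | ⟨x', k', hx', hc', he'⟩
    · have := ha2 x k hx hc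
      have : (0:Int) ≤ k := Int.natCast_nonneg k
      omega
    · have h2 := ha2 x' k' ((hPQ x').mpr hx') hc'
      omega

theorem fstep_dead (edges : List Int) : fstep edges (-1) = -1 := by
  unfold fstep; simp

theorem fstep_ran (edges : List Int) (hpre : Pre_longestCycle edges) (x : Int) :
    fstep edges x = -1 ∨ (0 ≤ fstep edges x ∧ fstep edges x < (edges.length : Int)) := by
  unfold fstep
  split_ifs with h
  · rw [PySem.List.pyGetD_eq_getElem edges (-1) h.1 h.2]
    exact hpre _ (List.getElem_mem _)
  · exact Or.inl rfl

theorem iter_add (edges : List Int) (a b : Nat) (x : Int) :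
    iterF edges (a + b) x = iterF edges b (iterF edges a x) := by
  induction a generalizing x with
  | zero => simp [iterF]
  | succ a ih =>
    have : a + 1 + b = (a + b) + 1 := by omega
    rw [this]
    show iterF edges (a + b) (fstep edges x) = _
    rw [ih (fstep edges x)]
    rfl

theorem iter_dead (edges : List Int) (d : Nat) : iterF edges d (-1) = -1 := by
  induction d with
  | zero => rfl
  | succ d ih => show iterF edges d (fstep edges (-1)) = -1; rw [fstep_dead]; exact ih

theorem iter_succ' (edges : List Int) (m : Nat) (x : Int) :
    iterF edges (m + 1) x = fstep edges (iterF edges m x) := by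
  have := iter_add edges m 1 x
  rw [this]; rfl

theorem iter_ran (edges : List Int) (hpre : Pre_longestCycle edges) (x : Int)
    (hx : x = -1 ∨ (0 ≤ x ∧ x < (edges.length : Int))) (m : Nat) :
    iterF edges m x = -1 ∨ (0 ≤ iterF edges m x ∧ iterF edges m x < (edges.length : Int)) := by
  induction m with
  | zero => exact hx
  | succ m ih =>
    rw [iter_succ']
    rcases ih with h | h
    · rw [h, fstep_dead]; exact Or.inl rfl
    · exact fstep_ran edges hpre _

theorem getElem_idx {α : Type} (l : List α) {i j : Nat} (hij : i = j) {hi : i < l.length} :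
    l[i]'hi = l[j]'(hij ▸ hi) := by subst hij; rfl

theorem nodup_bound (n : Nat) (l : List Int) (hnd : l.Nodup)
    (hb : ∀ y ∈ l, 0 ≤ y ∧ y < (n : Int)) : l.length ≤ n := by
  have hmap : (l.map Int.toNat).Nodup := by
    refine List.Nodup.map_on ?_ hnd
    intro x hx y hy hxy
    have hx' := hb x hx
    have hy' := hb y hy
    omega
  have hsub : (l.map Int.toNat).toFinset ⊆ Finset.range n := by
    intro m hm
    simp only [List.mem_toFinset, List.mem_map] at hm
    obtain ⟨y, hy, rfl⟩ := hm
    have := hb y hy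
    simp only [Finset.mem_range]
    omega
  have hcard := Finset.card_le_card hsub
  rw [List.toFinset_card_of_nodup hmap, Finset.card_range] at hcard
  simpa using hcard

theorem find?_range'_eq_some (p : Nat → Bool) (cnt : Nat) :
    ∀ (a L : Nat), a ≤ L → L < a + cnt → (∀ m, a ≤ m → m < L → p m = false) → p L = true →
    (List.range' a cnt).find? p = some L := by
  induction cnt with
  | zero => intro a L h1 h2 _ _; omega
  | succ cnt ih =>
    intro a L h1 h2 hfail hL
    rw [List.range'_succ, List.find?_cons]
    by_cases ha : a = L
    · subst ha; simp [hL]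
    · have hfa : p a = false := hfail a le_rfl (by omega)
      simp only [hfa]
      exact ih (a+1) L (by omega) (by omega) (fun m hm1 hm2 => hfail m (by omega) hm2) hL

-- A's timestamp lookup
def tsG (ts : List Int) (y : Int) : Int := PySem.List.pyGetD ts y 0

theorem tsG_set (ts : List Int) (x y t : Int) (hx0 : 0 ≤ x) (_hxn : x < (ts.length : Int))
    (hy0 : 0 ≤ y) (hyn : y < (ts.length : Int)) :
    tsG (PySem.List.pySetD ts x t) y = if y = x then t else tsG ts y := by
  unfold tsG
  rw [PySem.List.pySetD_of_nonneg ts t hx0,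
    PySem.List.pyGetD_eq_getElem _ _ hy0 (by simpa using hyn),
    PySem.List.pyGetD_eq_getElem _ _ hy0 hyn, List.getElem_set]
  by_cases h : y = x
  · simp [h]
  · have : x.toNat ≠ y.toNat := by omega
    simp [h, this]

-- invariant of A's inner walk: `vis` is the (ghost) set of nodes marked before the walk
-- started, `path` the nodes marked by this walk so far, in order
structure WInv (edges : List Int) (start : Int) (vis : Int → Bool) (ts : List Int)
    (t : Int) (path : List Int) : Prop where
  hlen : ts.length = edges.length
  hstart : 1 ≤ start
  hnd : path.Nodup
  hvb : ∀ y, vis y = true → 0 ≤ y ∧ y < (edges.length : Int)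
  hpb : ∀ y ∈ path, 0 ≤ y ∧ y < (edges.length : Int)
  hpv : ∀ y ∈ path, vis y = false
  hiff : ∀ y, 0 ≤ y → y < (edges.length : Int) → (tsG ts y ≠ 0 ↔ (vis y = true ∨ y ∈ path))
  hvts : ∀ y, vis y = true → 1 ≤ tsG ts y ∧ tsG ts y < start
  hidx : ∀ (k : Nat) (hk : k < path.length), tsG ts path[k] = start + (k : Int)
  ht : t = start + (path.length : Int)
  hchain : ∀ (j : Nat) (h : j + 1 < path.length), fstep edges path[j] = path[j+1]

-- full characterisation of A's inner walk
theorem walkA_char (edges : List Int) (hpre : Pre_longestCycle edges)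
    (start : Int) (vis : Int → Bool) :
    ∀ (fuel : Nat) (x : Int) (ts : List Int) (t : Int) (path : List Int),
    WInv edges start vis ts t path →
    (x = -1 ∨ (0 ≤ x ∧ x < (edges.length : Int))) →
    (∀ h : path ≠ [], fstep edges (path.getLast h) = x) →
    edges.length < fuel + path.length →
    ∃ ts' t' path' xf,
      lcWalkA edges fuel x ts t = (ts', t', xf) ∧
      WInv edges start vis ts' t' path' ∧
      (∀ h : path' ≠ [], fstep edges (path'.getLast h) = xf) ∧
      (xf = -1 ∨ (0 ≤ xf ∧ xf < (edges.length : Int))) ∧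
      (xf = -1 ∨ vis xf = true ∨ xf ∈ path') ∧
      (∃ q, path' = path ++ q) ∧
      (x ∈ path' ∨ (xf = x ∧ path' = path)) := by
  intro fuel
  induction fuel with
  | zero =>
    intro x ts t path hinv hx hlink hfuel
    exfalso
    have := nodup_bound edges.length path hinv.hnd hinv.hpb
    omega
  | succ fuel ih =>
    intro x ts t path hinv hx hlink hfuel
    obtain ⟨hlen, hstart, hnd, hvb, hpb, hpv, hiff, hvts, hidx, ht, hchain⟩ := hinv
    by_cases hc : x ≠ -1 ∧ PySem.List.pyGetD ts x 0 = 0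
    · obtain ⟨hxne, hts0⟩ := hc
      have hxr : 0 ≤ x ∧ x < (edges.length : Int) := hx.resolve_left hxne
      have hts0' : tsG ts x = 0 := hts0
      have hnomem : ¬ (vis x = true ∨ x ∈ path) := by
        intro h
        exact absurd ((hiff x hxr.1 hxr.2).mpr h) (by simp [hts0'])
      push_neg at hnomem
      obtain ⟨hxvis, hxpath⟩ := hnomem
      have hA : lcWalkA edges (fuel+1) x ts t
          = lcWalkA edges fuel (PySem.List.pyGetD edges x (-1)) (PySem.List.pySetD ts x t) (t+1) := by
        rw [lcWalkA, if_pos ⟨hxne, hts0⟩]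
      have hxlen : x < (ts.length : Int) := by rw [hlen]; exact hxr.2
      have hxE : PySem.List.pyGetD edges x (-1) = fstep edges x := by
        unfold fstep
        rw [if_pos hxr]
      have hx' : fstep edges x = -1 ∨ (0 ≤ fstep edges x ∧ fstep edges x < (edges.length : Int)) :=
        fstep_ran edges hpre x
      have hsget : ∀ (y : Int), 0 ≤ y → y < (edges.length : Int) →
          tsG (PySem.List.pySetD ts x t) y = if y = x then t else tsG ts y := by
        intro y hy0 hyn
        exact tsG_set ts x y t hxr.1 hxlen hy0 (by rw [hlen]; exact hyn)
      have ht1 : 1 ≤ t := by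
        have : (0:Int) ≤ (path.length : Int) := by positivity
        omega
      have hinv' : WInv edges start vis (PySem.List.pySetD ts x t) (t+1) (path ++ [x]) := by
        refine ⟨by rw [PySem.List.length_pySetD, hlen], hstart, ?_, hvb, ?_, ?_, ?_, ?_, ?_, ?_, ?_⟩
        · simp [List.nodup_append, hnd]
          intro a ha h
          exact hxpath (h ▸ ha)
        · intro y hy
          rcases List.mem_append.mp hy with h | h
          · exact hpb y h
          · simp only [List.mem_singleton] at h
            subst h
            exact hxr
        · intro y hy
          rcases List.mem_append.mp hy with h | h
          · exact hpv y h
          · simp only [List.mem_singleton] at h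
            subst h
            exact Bool.eq_false_iff.mpr hxvis
        · intro y hy0 hyn
          rw [hsget y hy0 hyn]
          by_cases hyx : y = x
          · subst hyx
            rw [if_pos rfl]
            constructor
            · intro _
              exact Or.inr (by simp)
            · intro _
              omega
          · rw [if_neg hyx, hiff y hy0 hyn]
            constructor
            · rintro (h | h)
              · exact Or.inl h
              · exact Or.inr (List.mem_append.mpr (Or.inl h))
            · rintro (h | h)
              · exact Or.inl h
              · rcases List.mem_append.mp h with h | h
                · exact Or.inr h
                · simp only [List.mem_singleton] at h
                  exact absurd h hyx
        · intro y hy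
          have hyx : y ≠ x := fun h => hxvis (h ▸ hy)
          have hb := hvb y hy
          rw [hsget y hb.1 hb.2, if_neg hyx]
          exact hvts y hy
        · intro k hk
          rw [List.length_append, List.length_singleton] at hk
          by_cases hklt : k < path.length
          · have hel : (path ++ [x])[k]'(by simp; omega) = path[k]'hklt :=
              List.getElem_append_left hklt
            rw [hel]
            have hb := hpb _ (List.getElem_mem hklt)
            have hne : path[k]'hklt ≠ x := fun h => hxpath (h ▸ List.getElem_mem hklt)
            rw [hsget _ hb.1 hb.2, if_neg hne]
            exact hidx k hklt
          · have hke : k = path.length := by omega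
            subst hke
            rw [List.getElem_concat_length rfl]
            rw [hsget x hxr.1 hxr.2, if_pos rfl, ht]
        · rw [List.length_append, List.length_singleton]
          push_cast
          omega
        · intro j hj
          rw [List.length_append, List.length_singleton] at hj
          by_cases hjlt : j + 1 < path.length
          · rw [List.getElem_append_left (by omega), List.getElem_append_left hjlt]
            exact hchain j hjlt
          · have hj1 : j + 1 = path.length := by omega
            have hne : path ≠ [] := List.ne_nil_of_length_pos (by omega)
            rw [List.getElem_append_left (by omega : j < path.length),
              List.getElem_concat_length hj1]
            have hjl : path[j] = path.getLast hne := by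
              rw [List.getLast_eq_getElem hne]
              exact getElem_idx path (by omega)
            rw [hjl]
            exact hlink hne
      have hlinknew : ∀ h : (path ++ [x]) ≠ [],
          fstep edges ((path ++ [x]).getLast h) = PySem.List.pyGetD edges x (-1) := by
        intro h
        rw [List.getLast_eq_getElem h, List.getElem_concat_length (by simp)]
        exact hxE.symm
      obtain ⟨ts', t', path', xf, hrec, winv', hlink2, hxf, hstop, ⟨q, hq⟩, hCx⟩ :=
        ih (PySem.List.pyGetD edges x (-1)) (PySem.List.pySetD ts x t) (t+1) (path ++ [x])
          hinv' (hxE ▸ hx') hlinknew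
          (by rw [List.length_append, List.length_singleton]; omega)
      refine ⟨ts', t', path', xf, hA ▸ hrec, winv', hlink2, hxf, hstop,
        ⟨[x] ++ q, by rw [hq, List.append_assoc]⟩, ?_⟩
      left
      rw [hq]
      exact List.mem_append.mpr (Or.inl (by simp))
    · have hA : lcWalkA edges (fuel+1) x ts t = (ts, t, x) := by
        rw [lcWalkA, if_neg hc]
      have hstop : x = -1 ∨ vis x = true ∨ x ∈ path := by
        by_cases hxe : x = -1
        · exact Or.inl hxe
        · have hxr := hx.resolve_left hxe
          have hne : tsG ts x ≠ 0 := fun h0 => hc ⟨hxe, h0⟩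
          exact Or.inr ((hiff x hxr.1 hxr.2).mp hne)
      exact ⟨ts, t, path, x, hA,
        ⟨hlen, hstart, hnd, hvb, hpb, hpv, hiff, hvts, hidx, ht, hchain⟩,
        hlink, hx, hstop, ⟨[], by simp⟩, Or.inr ⟨rfl, rfl⟩⟩

-- orbit structure of a completed walk path: positions step forward along the path
theorem iter_path (edges : List Int) (path : List Int)
    (hchain : ∀ (j : Nat) (h : j + 1 < path.length), fstep edges path[j] = path[j+1]) :
    ∀ (m j : Nat) (h : j + m < path.length),
      iterF edges m (path[j]'(by omega)) = path[j+m]'h := by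
  intro m
  induction m with
  | zero => intro j h; exact getElem_idx path (by omega)
  | succ m ih =>
    intro j h
    show iterF edges m (fstep edges (path[j]'(by omega))) = _
    rw [hchain j (by omega)]
    exact (ih (j+1) (by omega)).trans (getElem_idx path (by omega))

theorem iter_exit (edges : List Int) (path : List Int) (xf : Int)
    (hchain : ∀ (j : Nat) (h : j + 1 < path.length), fstep edges path[j] = path[j+1])
    (hlast : ∀ h : path ≠ [], fstep edges (path.getLast h) = xf) :
    ∀ (j : Nat) (h : j < path.length), iterF edges (path.length - j) (path[j]'h) = xf := by
  intro j h
  have hne : path ≠ [] := List.ne_nil_of_length_pos (by omega)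
  have hsplit : path.length - j = (path.length - 1 - j) + 1 := by omega
  rw [hsplit, iter_succ',
    iter_path edges path hchain (path.length - 1 - j) j (by omega),
    getElem_idx path (show j + (path.length - 1 - j) = path.length - 1 by omega),
    ← List.getLast_eq_getElem hne]
  exact hlast hne

-- cycle case: the walk re-entered its own path at position k
theorem iter_cycle (edges : List Int) (path : List Int) (k : Nat) (hk : k < path.length)
    (hchain : ∀ (j : Nat) (h : j + 1 < path.length), fstep edges path[j] = path[j+1])
    (hlast : ∀ h : path ≠ [], fstep edges (path.getLast h) = path[k]'hk) :
    ∀ (m j : Nat) (hj1 : k ≤ j) (hj2 : j < path.length),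
      iterF edges m (path[j]'hj2) =
        path[k + ((j - k + m) % (path.length - k))]'(by
          have := Nat.mod_lt (j - k + m) (show 0 < path.length - k by omega); omega) := by
  intro m
  induction m with
  | zero =>
    intro j hj1 hj2
    have hmod : (j - k + 0) % (path.length - k) = j - k :=
      Nat.mod_eq_of_lt (by omega)
    have hmod2 : j = k + ((j - k + 0) % (path.length - k)) := by rw [hmod]; omega
    exact getElem_idx path hmod2
  | succ m ih =>
    intro j hj1 hj2
    rw [iter_succ', ih j hj1 hj2]
    have hrlt : (j - k + m) % (path.length - k) < path.length - k :=
      Nat.mod_lt _ (by omega)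
    have hstep : (j - k + (m+1)) % (path.length - k)
        = ((j - k + m) % (path.length - k) + 1) % (path.length - k) := by
      have h1 : j - k + (m + 1)
          = (path.length - k) * ((j - k + m) / (path.length - k))
            + ((j - k + m) % (path.length - k) + 1) := by
        have := Nat.div_add_mod (j - k + m) (path.length - k)
        omega
      rw [h1, Nat.mul_add_mod]
    by_cases hcase : (j - k + m) % (path.length - k) + 1 < path.length - k
    · have hidx : k + ((j - k + (m+1)) % (path.length - k))
          = k + (j - k + m) % (path.length - k) + 1 := by
        rw [hstep, Nat.mod_eq_of_lt hcase]
        omega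
      rw [hchain (k + (j - k + m) % (path.length - k)) (by omega)]
      exact getElem_idx path hidx.symm
    · have hidx : k + ((j - k + (m+1)) % (path.length - k)) = k := by
        have h1 : (j - k + m) % (path.length - k) + 1 = path.length - k := by omega
        rw [hstep, h1, Nat.mod_self]
        omega
      have hne : path ≠ [] := List.ne_nil_of_length_pos (by omega)
      have h2 : k + (j - k + m) % (path.length - k) = path.length - 1 := by omega
      rw [getElem_idx path h2, ← List.getLast_eq_getElem hne, hlast hne]
      exact getElem_idx path hidx.symm

theorem cyc_of_cycle (edges : List Int)
    (path : List Int) (k : Nat) (hk : k < path.length)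
    (hnd : path.Nodup) (hlenb : path.length ≤ edges.length)
    (hchain : ∀ (j : Nat) (h : j + 1 < path.length), fstep edges path[j] = path[j+1])
    (hlast : ∀ h : path ≠ [], fstep edges (path.getLast h) = path[k]'hk) :
    ∀ (j : Nat) (hj : j < path.length),
      cyc edges (path[j]'hj) = if k ≤ j then some (path.length - k) else none := by
  intro j hj
  have hL : 0 < path.length - k := by omega
  by_cases hkj : k ≤ j
  · rw [if_pos hkj]
    unfold cyc
    apply find?_range'_eq_some _ _ 1 (path.length - k) (by omega) (by omega)
    · intro m hm1 hm2
      rw [decide_eq_false_iff_not]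
      intro hEq
      rw [iter_cycle edges path k hk hchain hlast m j hkj hj] at hEq
      have hinj := (List.Nodup.getElem_inj_iff hnd).mp hEq
      have hrlt : (j - k + m) % (path.length - k) < path.length - k := Nat.mod_lt _ hL
      have hmod : (j - k + m) % (path.length - k) = j - k := by omega
      rcases Nat.lt_or_ge (j - k + m) (path.length - k) with hc | hc
      · rw [Nat.mod_eq_of_lt hc] at hmod; omega
      · rw [Nat.mod_eq_sub_mod hc, Nat.mod_eq_of_lt (by omega)] at hmod; omega
    · rw [decide_eq_true_eq]
      rw [iter_cycle edges path k hk hchain hlast (path.length - k) j hkj hj]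
      refine getElem_idx path ?_
      have hmod : (j - k + (path.length - k)) % (path.length - k) = j - k := by
        rw [Nat.add_mod_right, Nat.mod_eq_of_lt (by omega)]
      omega
  · rw [if_neg hkj]
    unfold cyc
    rw [List.find?_eq_none]
    intro m hm
    have hm' := List.mem_range'_1.mp hm
    simp only [decide_eq_true_eq]
    intro hEq
    rcases Nat.lt_or_ge (j + m) path.length with hc | hc
    · rw [iter_path edges path hchain m j hc] at hEq
      have := (List.Nodup.getElem_inj_iff hnd).mp hEq
      omega
    · have hd : m = (path.length - j) + (m - (path.length - j)) := by omega
      rw [hd, iter_add, iter_exit edges path (path[k]'hk) hchain hlast j hj,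
        iter_cycle edges path k hk hchain hlast (m - (path.length - j)) k le_rfl hk] at hEq
      have := (List.Nodup.getElem_inj_iff hnd).mp hEq
      have hrlt : (k - k + (m - (path.length - j))) % (path.length - k) < path.length - k :=
        Nat.mod_lt _ hL
      omega

theorem cyc_of_dead (edges : List Int) (path : List Int)
    (hnd : path.Nodup) (hpb : ∀ y ∈ path, 0 ≤ y ∧ y < (edges.length : Int))
    (hchain : ∀ (j : Nat) (h : j + 1 < path.length), fstep edges path[j] = path[j+1])
    (hlast : ∀ h : path ≠ [], fstep edges (path.getLast h) = -1) :
    ∀ (j : Nat) (hj : j < path.length), cyc edges (path[j]'hj) = none := by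
  intro j hj
  unfold cyc
  rw [List.find?_eq_none]
  intro m hm
  have hm' := List.mem_range'_1.mp hm
  simp only [decide_eq_true_eq]
  intro hEq
  rcases Nat.lt_or_ge (j + m) path.length with hc | hc
  · rw [iter_path edges path hchain m j hc] at hEq
    have := (List.Nodup.getElem_inj_iff hnd).mp hEq
    omega
  · have hd : m = (path.length - j) + (m - (path.length - j)) := by omega
    rw [hd, iter_add, iter_exit edges path (-1) hchain hlast j hj, iter_dead] at hEq
    have := hpb _ (List.getElem_mem hj)
    omega

-- old-mark case: the walk exited into the already-marked, fstep-closed region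
theorem cyc_of_marked (edges : List Int) (vis : Int → Bool)
    (hclosed : ∀ y, vis y = true → fstep edges y = -1 ∨ vis (fstep edges y) = true)
    (path : List Int) (xf : Int) (hxf : vis xf = true)
    (hnd : path.Nodup) (hpb : ∀ y ∈ path, 0 ≤ y ∧ y < (edges.length : Int))
    (hpv : ∀ y ∈ path, vis y = false)
    (hchain : ∀ (j : Nat) (h : j + 1 < path.length), fstep edges path[j] = path[j+1])
    (hlast : ∀ h : path ≠ [], fstep edges (path.getLast h) = xf) :
    ∀ (j : Nat) (hj : j < path.length), cyc edges (path[j]'hj) = none := by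
  have hvis_iter : ∀ d, vis (iterF edges d xf) = true ∨ iterF edges d xf = -1 := by
    intro d
    induction d with
    | zero => exact Or.inl hxf
    | succ d ih =>
      rw [iter_succ']
      rcases ih with h | h
      · rcases hclosed _ h with h2 | h2
        · exact Or.inr h2
        · exact Or.inl h2
      · rw [h, fstep_dead]; exact Or.inr rfl
  intro j hj
  unfold cyc
  rw [List.find?_eq_none]
  intro m hm
  have hm' := List.mem_range'_1.mp hm
  simp only [decide_eq_true_eq]
  intro hEq
  rcases Nat.lt_or_ge (j + m) path.length with hc | hc
  · rw [iter_path edges path hchain m j hc] at hEq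
    have := (List.Nodup.getElem_inj_iff hnd).mp hEq
    omega
  · have hd : m = (path.length - j) + (m - (path.length - j)) := by omega
    rw [hd, iter_add, iter_exit edges path xf hchain hlast j hj] at hEq
    have hbnd := hpb _ (List.getElem_mem hj)
    have hvj := hpv _ (List.getElem_mem hj)
    rcases hvis_iter (m - (path.length - j)) with h | h
    · rw [hEq] at h
      rw [h] at hvj
      exact absurd hvj (by simp)
    · rw [hEq] at h
      omega

-- invariant of A's outer loop
structure OInv (edges ts : List Int) (t out : Int) : Prop where
  hlen : ts.length = edges.length
  ht1 : 1 ≤ t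
  hvts : ∀ y, 0 ≤ y → y < (edges.length : Int) → tsG ts y ≠ 0 → 1 ≤ tsG ts y ∧ tsG ts y < t
  hclosed : ∀ y, Marked edges ts y → fstep edges y = -1 ∨ tsG ts (fstep edges y) ≠ 0
  hbest : IsBest edges (Marked edges ts) out

theorem outerA (edges : List Int) (hpre : Pre_longestCycle edges) :
    ∀ (l : List Int), (∀ i ∈ l, 0 ≤ i ∧ i < (edges.length : Int)) →
    ∀ (ts : List Int) (t out : Int), OInv edges ts t out →
    ∃ ts' t' out', l.foldl (lcStepA edges) (ts, t, out) = (ts', t', out') ∧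
      OInv edges ts' t' out' ∧
      (∀ y, Marked edges ts y → Marked edges ts' y) ∧
      (∀ i ∈ l, Marked edges ts' i) := by
  intro l
  induction l with
  | nil =>
    intro _ ts t out hinv
    exact ⟨ts, t, out, rfl, hinv, fun y h => h, by simp⟩
  | cons i rest ih =>
    intro hl ts t out hinv
    have hir := hl i List.mem_cons_self
    have hrest : ∀ j ∈ rest, 0 ≤ j ∧ j < (edges.length : Int) :=
      fun j hj => hl j (List.mem_cons_of_mem i hj)
    obtain ⟨hlen, ht1, hvts, hclosed, hbest⟩ := hinv
    simp only [List.foldl_cons]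
    by_cases hski : tsG ts i ≠ 0
    · have hstep : lcStepA edges (ts, t, out) i = (ts, t, out) := by
        have hne : PySem.List.pyGetD (ts, t, out).1 i 0 ≠ 0 := hski
        rw [lcStepA, if_pos hne]
      rw [hstep]
      obtain ⟨ts', t', out', hfold, hoinv, hmono, hallrest⟩ :=
        ih hrest ts t out ⟨hlen, ht1, hvts, hclosed, hbest⟩
      refine ⟨ts', t', out', hfold, hoinv, hmono, ?_⟩
      intro j hj
      rcases List.mem_cons.mp hj with rfl | hj
      · exact hmono j ⟨hir.1, hir.2, hski⟩
      · exact hallrest j hj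
    · push_neg at hski
      have hvismem : ∀ y, (fun y => decide (0 ≤ y ∧ y < (edges.length : Int) ∧ PySem.List.pyGetD ts y 0 ≠ 0)) y = true
          ↔ Marked edges ts y := by
        intro y
        simp [Marked]
      set vis : Int → Bool :=
        fun y => decide (0 ≤ y ∧ y < (edges.length : Int) ∧ PySem.List.pyGetD ts y 0 ≠ 0) with hvisdef
      have hwinv : WInv edges t vis ts t [] := by
        refine ⟨hlen, ht1, List.nodup_nil, ?_, by simp, by simp, ?_, ?_, ?_, by simp, ?_⟩
        · intro y hy
          have := (hvismem y).mp hy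
          exact ⟨this.1, this.2.1⟩
        · intro y hy0 hyn
          simp only [List.not_mem_nil, or_false]
          rw [hvismem]
          exact ⟨fun h => ⟨hy0, hyn, h⟩, fun h => h.2.2⟩
        · intro y hy
          have hm := (hvismem y).mp hy
          exact hvts y hm.1 hm.2.1 hm.2.2
        · intro k hk
          simp at hk
        · intro j hj
          simp at hj
      obtain ⟨ts', t', path', xf, hw, winv', hlink', hxfran, hstop, ⟨q, hq⟩, hCx⟩ :=
        walkA_char edges hpre t vis (edges.length + 1) i ts t [] hwinv (Or.inr hir)
          (by intro h; simp at h) (by simp)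
      have hpathlen : path'.length ≤ edges.length := nodup_bound _ _ winv'.hnd winv'.hpb
      have hiff' := winv'.hiff
      have hmark' : ∀ y, Marked edges ts' y ↔ (vis y = true ∨ y ∈ path') := by
        intro y
        constructor
        · intro hm
          exact (hiff' y hm.1 hm.2.1).mp hm.2.2
        · intro h
          have hb : 0 ≤ y ∧ y < (edges.length : Int) := by
            rcases h with h | h
            · exact winv'.hvb y h
            · exact winv'.hpb y h
          exact ⟨hb.1, hb.2, (hiff' y hb.1 hb.2).mpr h⟩
      have hipath : i ∈ path' := by
        rcases hCx with h | ⟨hxi, hpe⟩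
        · exact h
        · exfalso
          rcases hstop with h | h | h
          · rw [hxi] at h
            omega
          · rw [hxi] at h
            exact ((hvismem i).mp h).2.2 hski
          · rw [hpe] at h
            simp at h
      have hmono1 : ∀ y, Marked edges ts y → Marked edges ts' y := by
        intro y hm
        exact (hmark' y).mpr (Or.inl ((hvismem y).mpr hm))
      have hvisclosed : ∀ y, vis y = true → fstep edges y = -1 ∨ vis (fstep edges y) = true := by
        intro y hy
        have hm := (hvismem y).mp hy
        rcases hclosed y hm with h | h
        · exact Or.inl h
        · rcases fstep_ran edges hpre y with h2 | h2
          · exact Or.inl h2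
          · exact Or.inr ((hvismem _).mpr ⟨h2.1, h2.2, h⟩)
      have ht1' : 1 ≤ t' := by
        have := winv'.ht
        have h0 : (0:Int) ≤ (path'.length : Int) := by positivity
        omega
      have htle : t ≤ t' := by
        have := winv'.ht
        have h0 : (0:Int) ≤ (path'.length : Int) := by positivity
        omega
      have hstepA : lcStepA edges (ts, t, out) i =
          (ts', t', if xf ≠ -1 ∧ PySem.List.pyGetD ts' xf 0 ≥ t
            then max out (t' - PySem.List.pyGetD ts' xf 0) else out) := by
        have hc0 : ¬ PySem.List.pyGetD (ts, t, out).1 i 0 ≠ 0 := by simpa using hski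
        have hw2 : lcWalkA edges (edges.length + 1) i (ts, t, out).1 (ts, t, out).2.1
            = (ts', t', xf) := hw
        rw [lcStepA, if_neg hc0, hw2]
      rw [hstepA]
      -- the recorded output is the best over the enlarged marked set
      have hbest2 : IsBest edges (Marked edges ts')
          (if xf ≠ -1 ∧ PySem.List.pyGetD ts' xf 0 ≥ t
            then max out (t' - PySem.List.pyGetD ts' xf 0) else out) := by
        by_cases hxe : xf = -1
        · rw [if_neg (by simp [hxe])]
          have hcycnone := cyc_of_dead edges path' winv'.hnd winv'.hpb winv'.hchain
            (by intro h; rw [← hxe]; exact hlink' h)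
          constructor
          · rcases hbest.1 with h | ⟨z, k, hz, hc, he⟩
            · exact Or.inl h
            · exact Or.inr ⟨z, k, hmono1 z hz, hc, he⟩
          · intro z k hm hc
            rcases (hmark' z).mp hm with hv | hp
            · exact hbest.2 z k ((hvismem z).mp hv) hc
            · obtain ⟨j, hj, hje⟩ := List.getElem_of_mem hp
              rw [← hje, hcycnone j hj] at hc
              exact absurd hc (by simp)
        · rcases hstop with h | hvis | hmem
          · exact absurd h hxe
          · have hts' := winv'.hvts xf hvis
            have hcond : ¬ (xf ≠ -1 ∧ PySem.List.pyGetD ts' xf 0 ≥ t) := by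
              intro hcc
              have hlt : tsG ts' xf < t := hts'.2
              have : PySem.List.pyGetD ts' xf 0 < t := hlt
              omega
            rw [if_neg hcond]
            have hcycnone := cyc_of_marked edges vis hvisclosed path' xf hvis
              winv'.hnd winv'.hpb winv'.hpv winv'.hchain hlink'
            constructor
            · rcases hbest.1 with h | ⟨z, k, hz, hc, he⟩
              · exact Or.inl h
              · exact Or.inr ⟨z, k, hmono1 z hz, hc, he⟩
            · intro z k hm hc
              rcases (hmark' z).mp hm with hv | hp
              · exact hbest.2 z k ((hvismem z).mp hv) hc
              · obtain ⟨j, hj, hje⟩ := List.getElem_of_mem hp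
                rw [← hje, hcycnone j hj] at hc
                exact absurd hc (by simp)
          · obtain ⟨k, hk, hke⟩ := List.getElem_of_mem hmem
            have htsxf : tsG ts' xf = t + (k : Int) := by
              rw [← hke]
              exact winv'.hidx k hk
            have hcond : xf ≠ -1 ∧ PySem.List.pyGetD ts' xf 0 ≥ t := by
              refine ⟨hxe, ?_⟩
              have : PySem.List.pyGetD ts' xf 0 = t + (k : Int) := htsxf
              have hk0 : (0:Int) ≤ (k : Int) := by positivity
              omega
            rw [if_pos hcond]
            have hval : t' - PySem.List.pyGetD ts' xf 0 = ((path'.length - k : Nat) : Int) := by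
              have h1 : PySem.List.pyGetD ts' xf 0 = t + (k : Int) := htsxf
              have h2 := winv'.ht
              rw [h1, h2]
              push_cast [Nat.cast_sub (le_of_lt hk)]
              ring
            rw [hval]
            have hlast' : ∀ h : path' ≠ [], fstep edges (path'.getLast h) = path'[k]'hk := by
              intro h
              rw [hke]
              exact hlink' h
            have hcyc := cyc_of_cycle edges path' k hk winv'.hnd hpathlen winv'.hchain hlast'
            have hL1 : (1:Int) ≤ ((path'.length - k : Nat) : Int) := by
              have : 1 ≤ path'.length - k := by omega
              exact_mod_cast this
            constructor
            · rcases le_total out (((path'.length - k : Nat)) : Int) with hle | hge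
              · refine Or.inr ⟨path'[k]'hk, path'.length - k,
                  (hmark' _).mpr (Or.inr (List.getElem_mem hk)), ?_, max_eq_right hle⟩
                rw [hcyc k hk, if_pos le_rfl]
              · rcases hbest.1 with h | ⟨z, m, hz, hc, he⟩
                · exfalso
                  omega
                · exact Or.inr ⟨z, m, hmono1 z hz, hc, by rw [max_eq_left hge]; exact he⟩
            · intro z m hm hc
              rcases (hmark' z).mp hm with hv | hp
              · exact le_trans (hbest.2 z m ((hvismem z).mp hv) hc) (le_max_left _ _)
              · obtain ⟨j, hj, hje⟩ := List.getElem_of_mem hp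
                rw [← hje, hcyc j hj] at hc
                by_cases hkj : k ≤ j
                · rw [if_pos hkj] at hc
                  have : path'.length - k = m := Option.some.inj hc
                  rw [← this]
                  exact le_max_right _ _
                · rw [if_neg hkj] at hc
                  exact absurd hc (by simp)
      -- remaining OInv fields at (ts', t')
      have hvts' : ∀ y, 0 ≤ y → y < (edges.length : Int) → tsG ts' y ≠ 0 →
          1 ≤ tsG ts' y ∧ tsG ts' y < t' := by
        intro y hy0 hyn hne
        rcases (hiff' y hy0 hyn).mp hne with hv | hp
        · have := winv'.hvts y hv
          exact ⟨this.1, lt_of_lt_of_le this.2 htle⟩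
        · obtain ⟨j, hj, hje⟩ := List.getElem_of_mem hp
          have := winv'.hidx j hj
          rw [hje] at this
          have hjlt : (j : Int) < (path'.length : Int) := by exact_mod_cast hj
          have hj0 : (0:Int) ≤ (j : Int) := by positivity
          have h2 := winv'.ht
          omega
      have hclosed' : ∀ y, Marked edges ts' y →
          fstep edges y = -1 ∨ tsG ts' (fstep edges y) ≠ 0 := by
        intro y hm
        rcases (hmark' y).mp hm with hv | hp
        · rcases hvisclosed y hv with h | h
          · exact Or.inl h
          · exact Or.inr ((hmark' _).mpr (Or.inl h)).2.2
        · obtain ⟨j, hj, hje⟩ := List.getElem_of_mem hp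
          by_cases hjl : j + 1 < path'.length
          · have := winv'.hchain j hjl
            rw [hje] at this
            exact Or.inr ((hmark' _).mpr (Or.inr (this ▸ List.getElem_mem hjl))).2.2
          · have hne : path' ≠ [] := List.ne_nil_of_length_pos (by omega)
            have hyl : y = path'.getLast hne := by
              rw [List.getLast_eq_getElem hne, ← hje]
              exact getElem_idx path' (by omega)
            have hfy : fstep edges y = xf := by
              rw [hyl]
              exact hlink' hne
            rcases hstop with h | h | h
            · rw [hfy]
              exact Or.inl h
            · exact Or.inr ((hmark' _).mpr (Or.inl (hfy ▸ h))).2.2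
            · exact Or.inr ((hmark' _).mpr (Or.inr (hfy ▸ h))).2.2
      obtain ⟨ts'', t'', out'', hfold, hoinv, hmono2, hallrest⟩ :=
        ih hrest ts' t' _ ⟨winv'.hlen, ht1', hvts', hclosed', hbest2⟩
      refine ⟨ts'', t'', out'', hfold, hoinv, ?_, ?_⟩
      · intro y hy
        exact hmono2 y (hmono1 y hy)
      · intro j hj
        rcases List.mem_cons.mp hj with rfl | hj
        · exact hmono2 j ((hmark' j).mpr (Or.inr hipath))
        · exact hallrest j hj

theorem IsBest_congr (edges : List Int) (P Q : Int → Prop) (out : Int)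
    (h : ∀ y, P y ↔ Q y) : IsBest edges P out → IsBest edges Q out := by
  intro hb
  constructor
  · rcases hb.1 with h1 | ⟨x, k, hx, hc, he⟩
    · exact Or.inl h1
    · exact Or.inr ⟨x, k, (h x).mp hx, hc, he⟩
  · intro x k hq hc
    exact hb.2 x k ((h x).mpr hq) hc

-- B's inner loop computes the first return time
theorem bWalk_char (edges : List Int) (hpre : Pre_longestCycle edges) (x : Int)
    (hx : 0 ≤ x ∧ x < (edges.length : Int)) :
    ∀ (fuel k : Nat) (y : Int), y = iterF edges k x → 1 ≤ k → k ≤ edges.length →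
    (∀ m, 1 ≤ m → m < k → iterF edges m x ≠ x) → edges.length ≤ fuel + k →
    ∃ y' k', bWalk edges x fuel y (k : Int) = (y', ((k' : Nat) : Int)) ∧
      ((y' = x ∧ cyc edges x = some k') ∨ (y' ≠ x ∧ cyc edges x = none)) := by
  intro fuel
  induction fuel with
  | zero =>
    intro k y hy hk1 hkn hmin hfuel
    refine ⟨y, k, rfl, ?_⟩
    by_cases hyx : y = x
    · left
      refine ⟨hyx, ?_⟩
      unfold cyc
      apply find?_range'_eq_some _ _ 1 k hk1 (by omega)
      · intro m hm1 hm2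
        rw [decide_eq_false_iff_not]
        exact hmin m hm1 hm2
      · rw [decide_eq_true_eq, ← hy]
        exact hyx
    · right
      refine ⟨hyx, ?_⟩
      unfold cyc
      rw [List.find?_eq_none]
      intro m hm
      have hm' := List.mem_range'_1.mp hm
      simp only [decide_eq_true_eq]
      intro hEq
      by_cases hmk : m < k
      · exact hmin m hm'.1 hmk hEq
      · have hmke : m = k := by omega
        rw [hmke, ← hy] at hEq
        exact hyx hEq
  | succ fuel ih =>
    intro k y hy hk1 hkn hmin hfuel
    by_cases hcond : (k : Int) < (edges.length : Int) ∧ y ≠ -1 ∧ y ≠ x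
    · have hstep : bWalk edges x (fuel+1) y (k : Int)
          = bWalk edges x fuel (PySem.List.pyGetD edges y (-1)) ((k : Int) + 1) := by
        rw [bWalk, if_pos hcond]
      have hyran : 0 ≤ y ∧ y < (edges.length : Int) := by
        rcases iter_ran edges hpre x (Or.inr hx) k with h | h
        · rw [← hy] at h
          exact absurd h hcond.2.1
        · rw [← hy] at h
          exact h
      have hnext : PySem.List.pyGetD edges y (-1) = iterF edges (k+1) x := by
        rw [iter_succ', ← hy]
        unfold fstep
        rw [if_pos hyran]
      have hklt : k < edges.length := by exact_mod_cast hcond.1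
      have hcast : ((k : Int) + 1) = (((k + 1 : Nat)) : Int) := by push_cast; ring
      rw [hstep, hcast, hnext]
      apply ih (k+1) _ rfl (by omega) (by omega) ?_ (by omega)
      intro m h1 h2
      by_cases hmk : m < k
      · exact hmin m h1 hmk
      · have : m = k := by omega
        rw [this, ← hy]
        exact hcond.2.2
    · have hstop : bWalk edges x (fuel+1) y (k : Int) = (y, (k : Int)) := by
        rw [bWalk, if_neg hcond]
      refine ⟨y, k, hstop, ?_⟩
      by_cases hyx : y = x
      · left
        refine ⟨hyx, ?_⟩
        unfold cyc
        apply find?_range'_eq_some _ _ 1 k hk1 (by omega)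
        · intro m hm1 hm2
          rw [decide_eq_false_iff_not]
          exact hmin m hm1 hm2
        · rw [decide_eq_true_eq, ← hy]
          exact hyx
      · right
        refine ⟨hyx, ?_⟩
        unfold cyc
        rw [List.find?_eq_none]
        intro m hm
        have hm' := List.mem_range'_1.mp hm
        simp only [decide_eq_true_eq]
        intro hEq
        by_cases hmk : m < k
        · exact hmin m hm'.1 hmk hEq
        · by_cases hkn2 : k = edges.length
          · have hmke : m = k := by omega
            rw [hmke, ← hy] at hEq
            exact hyx hEq
          · have hklt : (k : Int) < (edges.length : Int) := by
              have : k < edges.length := by omega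
              exact_mod_cast this
            have hy1 : y = -1 := by
              by_contra hne
              exact hcond ⟨hklt, hne, hyx⟩
            have hdead : iterF edges m x = -1 := by
              have hm2 : m = k + (m - k) := by omega
              rw [hm2, iter_add, ← hy, hy1, iter_dead]
            rw [hdead] at hEq
            omega

theorem lcStepB_eq (edges : List Int) (hpre : Pre_longestCycle edges) (best x : Int)
    (hx : 0 ≤ x ∧ x < (edges.length : Int)) :
    lcStepB edges best x = match cyc edges x with
      | some k => max best (k : Int)
      | none => best := by
  have hn1 : 1 ≤ edges.length := by
    rcases Nat.eq_zero_or_pos edges.length with h | h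
    · rw [h] at hx
      simp at hx
      omega
    · exact h
  have hfirst : iterF edges 1 x = PySem.List.pyGetD edges x (-1) := by
    show fstep edges x = _
    unfold fstep
    rw [if_pos hx]
  obtain ⟨y', k', heq, hdisj⟩ :=
    bWalk_char edges hpre x hx edges.length 1 (PySem.List.pyGetD edges x (-1))
      hfirst.symm le_rfl hn1 (by intro m h1 h2; omega) (by omega)
  rw [show (((1:Nat)):Int) = (1:Int) from by norm_num] at heq
  unfold lcStepB
  rw [heq]
  rcases hdisj with ⟨hyx, hc⟩ | ⟨hyx, hc⟩
  · rw [hc]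
    simp [hyx]
  · rw [hc]
    simp [hyx]

theorem lcStepB_none (edges : List Int) (hpre : Pre_longestCycle edges) (best x : Int)
    (hx : 0 ≤ x ∧ x < (edges.length : Int)) (h : cyc edges x = none) :
    lcStepB edges best x = best := by
  rw [lcStepB_eq edges hpre best x hx, h]

theorem lcStepB_some (edges : List Int) (hpre : Pre_longestCycle edges) (best x : Int)
    (hx : 0 ≤ x ∧ x < (edges.length : Int)) (k : Nat) (h : cyc edges x = some k) :
    lcStepB edges best x = max best (k : Int) := by
  rw [lcStepB_eq edges hpre best x hx, h]

theorem foldB (edges : List Int) (hpre : Pre_longestCycle edges) :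
    ∀ (l : List Int), (∀ i ∈ l, 0 ≤ i ∧ i < (edges.length : Int)) →
    ∀ (best : Int) (P : Int → Prop), IsBest edges P best →
    IsBest edges (fun y => P y ∨ y ∈ l) (l.foldl (lcStepB edges) best) := by
  intro l
  induction l with
  | nil =>
    intro _ best P hbest
    simp only [List.foldl_nil]
    exact IsBest_congr edges P _ best (by simp) hbest
  | cons x rest ih =>
    intro hl best P hbest
    have hxv := hl x List.mem_cons_self
    simp only [List.foldl_cons]
    have hstep : IsBest edges (fun y => P y ∨ y = x) (lcStepB edges best x) := by
      cases hcx : cyc edges x with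
      | none =>
        rw [lcStepB_none edges hpre best x hxv hcx]
        constructor
        · rcases hbest.1 with h | ⟨z, k, hz, hc, he⟩
          · exact Or.inl h
          · exact Or.inr ⟨z, k, Or.inl hz, hc, he⟩
        · intro z k hz hc
          rcases hz with hz | rfl
          · exact hbest.2 z k hz hc
          · rw [hcx] at hc
            exact absurd hc (by simp)
      | some k =>
        rw [lcStepB_some edges hpre best x hxv k hcx]
        constructor
        · rcases le_total best ((k : Int)) with hle | hge
          · exact Or.inr ⟨x, k, Or.inr rfl, hcx, max_eq_right hle⟩
          · rcases hbest.1 with h | ⟨z, m, hz, hc, he⟩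
            · exfalso
              have : (0:Int) ≤ (k : Int) := Int.natCast_nonneg k
              omega
            · exact Or.inr ⟨z, m, Or.inl hz, hc, by rw [max_eq_left hge]; exact he⟩
        · intro z m hz hc
          rcases hz with hz | rfl
          · exact le_trans (hbest.2 z m hz hc) (le_max_left _ _)
          · rw [hcx] at hc
            have hkm : k = m := Option.some.inj hc
            rw [← hkm]
            exact le_max_right _ _
    have hrec := ih (fun j hj => hl j (List.mem_cons_of_mem x hj)) (lcStepB edges best x) _ hstep
    refine IsBest_congr edges _ _ _ ?_ hrec
    intro y
    simp only [List.mem_cons]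
    tauto

-- ===== VERDICT (by name: the statement is the Claim_ definition above) =====
theorem longestCycle_spec : Claim_equal_longestCycle := by
  intro edges _ hpre
  show longestCycle edges = longestCycle_alt edges
  have hrange : ∀ i ∈ PySem.List.pyRange 0 (edges.length) 1, 0 ≤ i ∧ i < (edges.length : Int) := by
    intro i hi
    have := PySem.List.mem_pyRange_one.mp hi
    exact ⟨this.1, this.2⟩
  -- A side
  have hinit : OInv edges (List.replicate edges.length 0) 1 (-1) := by
    refine ⟨List.length_replicate, le_refl 1, ?_, ?_, ?_⟩
    · intro y hy0 hyn h
      exfalso; apply h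
      unfold tsG
      rw [PySem.List.pyGetD_eq_getElem _ _ hy0 (by simpa using hyn)]
      simp
    · intro y hy
      exfalso
      obtain ⟨hy0, hyn, h⟩ := hy
      apply h
      show tsG (List.replicate edges.length 0) y = 0
      unfold tsG
      rw [PySem.List.pyGetD_eq_getElem _ _ hy0 (by simpa using hyn)]
      simp
    · constructor
      · exact Or.inl rfl
      · intro x k hx _
        exfalso
        obtain ⟨hy0, hyn, h⟩ := hx
        apply h
        rw [PySem.List.pyGetD_eq_getElem _ _ hy0 (by simpa using hyn)]
        simp
  obtain ⟨ts', t', out', hfold, hoinv, _, hall⟩ :=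
    outerA edges hpre _ hrange (List.replicate edges.length 0) 1 (-1) hinit
  have hA : longestCycle edges = out' := by
    unfold longestCycle
    rw [hfold]
  -- B side
  have hBinit : IsBest edges (fun _ => False) (-1) :=
    ⟨Or.inl rfl, fun x k h => absurd h (by simp)⟩
  have hB := foldB edges hpre _ hrange (-1) _ hBinit
  rw [hA]
  exact IsBest_unique edges (Marked edges ts') _ out' _
    (by
      intro y
      constructor
      · intro hy
        exact Or.inr (PySem.List.mem_pyRange_one.mpr ⟨hy.1, hy.2.1⟩)
      · intro hy
        rcases hy with h | h
        · exact absurd h not_false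
        · exact hall y h)
    hoinv.hbest hB
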